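-- pv_equiv track=rewrite | github.com/lukmdo/code4gcj | 2013/qualification/Dtreasure.py | _can_open_all
-- ===== SOURCE A (Python) =====
-- from collections import Counter
--
-- def _can_open_all(chests, keys):
--     if not chests:
--         return True
--     # eulerian path: code.google.com/codejam/contest/2270488/dashboard#s=a&a=3
--
--     # enough_keys_by_type
--     all_keys = list(keys)
--     chest_open_keys = []
--     for chest in chests:
--         chest_num, open_key, *found_keys = chest
--         all_keys.extend(found_keys)
--         chest_open_keys.append(open_key)
--     all_keys_count = Counter(all_keys)
--     chest_open_keys_count = Counter(chest_open_keys)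
--     enough_keys_by_type = all(
--         v <= all_keys_count.get(k, 0) for k, v in chest_open_keys_count.items())
--     if not enough_keys_by_type:
--         return False
--
--     # each chest_open_key type can be reached
--     chest_open_keys_set = set(chest_open_keys)
--     seen_keys_set = set(keys)
--     if chest_open_keys_set.issubset(seen_keys_set):
--         return True
--     can_open_and_non_empty = lambda c: c[2:] and c[1] in seen_keys_set
--     other_chests = set(chests)
--
--     bfs_queue = set(filter(can_open_and_non_empty, chests))
--     while bfs_queue:
--         other_chests -= bfs_queue
--         chest = bfs_queue.pop()
--         seen_keys_set |= set(chest[2:])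
--         if chest_open_keys_set.issubset(seen_keys_set):
--             return True
--         child_chests = filter(can_open_and_non_empty, other_chests)
--         bfs_queue |= set(child_chests)
--
--     return False
-- ===== SOURCE B (Python) =====
-- from collections import Counter
--
-- def _can_open_all(chests, keys):
--     if not chests:
--         return True
--     # count check: every open-key type must be available often enough overall
--     need = Counter(chest[1] for chest in chests)
--     total = Counter(keys)
--     for chest in chests:
--         total.update(chest[2:])
--     if any(total[k] < need[k] for k in need):
--         return False
--     # reachability: index chests by their open key, process each key type once
--     by_open = {}
--     for chest in chests:
--         by_open.setdefault(chest[1], []).append(chest[2:])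
--     seen = set()
--     stack = []
--     for k in keys:
--         if k not in seen:
--             seen.add(k)
--             stack.append(k)
--     while stack:
--         k = stack.pop()
--         for found in by_open.pop(k, []):
--             for f in found:
--                 if f not in seen:
--                     seen.add(f)
--                     stack.append(f)
--     return all(k in seen for k in need)
-- ===== Notes on version B (the rewrite author's own statement) =====
-- stated objective: alternative
-- what changed: Replaces A's BFS over a set of whole chests (which re-filters all remaining chests after every pop, with early-exit issubset tests) by a key-type BFS: chests are indexed once by their required open key, each key type is popped from a stack at most once, and a final subset check decides the answer.
import Mathlib
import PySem

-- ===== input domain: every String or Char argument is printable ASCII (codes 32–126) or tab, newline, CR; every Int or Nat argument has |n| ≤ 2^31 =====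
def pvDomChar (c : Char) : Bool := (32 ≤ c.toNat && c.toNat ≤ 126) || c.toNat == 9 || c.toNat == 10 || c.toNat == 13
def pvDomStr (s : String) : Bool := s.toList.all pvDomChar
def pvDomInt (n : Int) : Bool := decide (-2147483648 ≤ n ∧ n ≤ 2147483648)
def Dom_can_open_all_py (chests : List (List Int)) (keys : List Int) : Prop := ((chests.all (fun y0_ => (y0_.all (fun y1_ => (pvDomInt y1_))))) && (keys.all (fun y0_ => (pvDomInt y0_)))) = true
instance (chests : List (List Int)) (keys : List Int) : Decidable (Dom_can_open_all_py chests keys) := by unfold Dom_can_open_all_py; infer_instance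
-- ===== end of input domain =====

-- B replaces A's BFS over a set of whole chests (which re-filters all remaining chests
-- after every pop) by a key-type BFS over an index of chests by their open key, with a
-- final subset check instead of A's early-exit issubset tests; same Bool on Pre_.


-- ===== PORT A =====
-- 'lambda c: c[2:] and c[1] in seen_keys_set' (truthiness of the slice, then membership);
-- on chests of length ≥ 2 (Pre_) 'c.drop 2' is c[2:] and 'c.getD 1 0' is c[1], exactly.
def pvCanOpenNonEmpty (seen : PySem.Set Int) (c : List Int) : Bool :=
  !((c.drop 2).isEmpty) && PySem.Set.contains seen (c.getD 1 0)

-- A's 'while bfs_queue' loop.  'bfs_queue.pop()' takes an arbitrary element (hash order,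
-- not modelled); the port pops the first one — pvABfs_spec below shows the returned Bool
-- is reachability of the open-key types, so it does not depend on the pop order.  fuel =
-- chests.length bounds the iterations: each one consumes a chest that never re-enters the
-- queue (it leaves other_chests first) — pvABfs_spec carries this bound.
def pvABfs : Nat → PySem.Set Int → PySem.Set Int → PySem.Set (List Int) → PySem.Set (List Int) → Bool
  | 0, _, _, _, _ => false
  | fuel + 1, opens, seen, other, queue =>
    match queue with
    | [] => false
    | chest :: rest =>
      let other' := PySem.Set.diff other queue
      let seen' := PySem.Set.union seen (PySem.Set.ofList (chest.drop 2))
      if PySem.Set.issubset opens seen' then true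
      else
        let queue' := PySem.Set.union rest (other'.filter (pvCanOpenNonEmpty seen'))
        pvABfs fuel opens seen' other' queue'

def can_open_all_py (chests : List (List Int)) (keys : List Int) : Bool :=
  if chests = [] then true
  else
    -- 'chest_num, open_key, *found_keys = chest' raises ValueError on len < 2 (outside Pre_)
    let st := chests.foldl (fun (s : List Int × List Int) chest =>
        (s.1 ++ chest.drop 2, s.2 ++ [chest.getD 1 0])) (keys, [])
    let all_keys_count := PySem.Dict.counter st.1
    let chest_open_keys_count := PySem.Dict.counter st.2
    let enough := chest_open_keys_count.items.all
        (fun kv => decide (kv.2 ≤ all_keys_count.getD kv.1 0))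
    if !enough then false
    else
      let chest_open_keys_set := PySem.Set.ofList st.2
      let seen_keys_set := PySem.Set.ofList keys
      if PySem.Set.issubset chest_open_keys_set seen_keys_set then true
      else
        let other_chests := PySem.Set.ofList chests
        let bfs_queue := PySem.Set.ofList (chests.filter (pvCanOpenNonEmpty seen_keys_set))
        pvABfs chests.length chest_open_keys_set seen_keys_set other_chests bfs_queue

-- ===== PORT B =====
-- B's 'while stack' loop: pop a key type from the stack end, remove its chest bucket from
-- the index, push its unseen found keys; state = (index, seen, stack), returns seen.
-- fuel bounds the pops (every pop matches a push; pushes are ≤ |keys| + total found keys)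
-- — pvBBfs_spec below carries this bound.
def pvBBfs : Nat → PySem.Dict Int (List (List Int)) → PySem.Set Int → List Int → PySem.Set Int
  | 0, _, seen, _ => seen
  | fuel + 1, byOpen, seen, stack =>
    match stack with
    | [] => seen
    | s@(_ :: _) =>
      let k := s.getLastD 0                    -- stack.pop()
      let stack0 := s.dropLast
      let foundLists := byOpen.getD k []       -- by_open.pop(k, [])
      let byOpen' := byOpen.erase k
      let st := foundLists.foldl (fun (st : PySem.Set Int × List Int) fl =>
          fl.foldl (fun (st : PySem.Set Int × List Int) f =>
            if f ∈ st.1 then st else (PySem.Set.add st.1 f, st.2 ++ [f])) st) (seen, stack0)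
      pvBBfs fuel byOpen' st.1 st.2

def can_open_all_py_alt (chests : List (List Int)) (keys : List Int) : Bool :=
  if chests = [] then true
  else
    let need := PySem.Dict.counter (chests.map (fun c => c.getD 1 0))
    let total := chests.foldl
        (fun (d : PySem.Dict Int Int) c =>
          (c.drop 2).foldl (fun d k => d.modify k 0 (· + 1)) d)
        (PySem.Dict.counter keys)
    if need.keys.any (fun k => decide (total.getD k 0 < need.getD k 0)) then false
    else
      let byOpen := chests.foldl
          (fun (d : PySem.Dict Int (List (List Int))) c =>
            d.modify (c.getD 1 0) [] (· ++ [c.drop 2]))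
          PySem.Dict.empty                     -- by_open.setdefault(c[1], []).append(c[2:])
      let init := keys.foldl (fun (st : PySem.Set Int × List Int) k =>
          if k ∈ st.1 then st else (PySem.Set.add st.1 k, st.2 ++ [k])) ([], [])
      let fuel := keys.length + (chests.map (fun c => (c.drop 2).length)).sum
      let seen := pvBBfs fuel byOpen init.1 init.2
      need.keys.all (fun k => decide (k ∈ seen))

-- ===== PRECONDITION & SPEC =====
-- Pre_ excludes only the inputs on which Python A raises: a nonempty chest list containing
-- a chest with fewer than 2 entries makes 'chest_num, open_key, *found_keys = chest' raise
-- ValueError (B raises there as well, on its 'chest[1]').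
def Pre_can_open_all_py (chests : List (List Int)) (keys : List Int) : Prop :=
  chests = [] ∨ ∀ c ∈ chests, 2 ≤ c.length
instance (chests : List (List Int)) (keys : List Int) : Decidable (Pre_can_open_all_py chests keys) := by
  unfold Pre_can_open_all_py; infer_instance

def pvWitness_can_open_all_py : List (List Int) × List Int := ([[1, 2], [3, 2], [4, 5, 6]], [2])

def Spec_can_open_all_py (chests : List (List Int)) (keys : List Int) (out : Bool) : Prop := out = can_open_all_py_alt chests keys
instance (chests : List (List Int)) (keys : List Int) (out : Bool) : Decidable (Spec_can_open_all_py chests keys out) := by unfold Spec_can_open_all_py; infer_instance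

-- ===== CLAIM (what is proved, stated in full; the proofs are below) =====
def Claim_equal_can_open_all_py : Prop := ∀ (chests : List (List Int)) (keys : List Int), Dom_can_open_all_py chests keys → Pre_can_open_all_py chests keys → Spec_can_open_all_py chests keys (can_open_all_py chests keys)

-- ===== LEMMAS AND PROOFS =====

def pvOpenKeys (chests : List (List Int)) : List Int := chests.map (fun c => c.getD 1 0)
def pvAllKeys (chests : List (List Int)) (keys : List Int) : List Int :=
  keys ++ chests.flatMap (fun c => c.drop 2)
def pvEnough (chests : List (List Int)) (keys : List Int) : Prop :=
  ∀ k ∈ pvOpenKeys chests, (pvOpenKeys chests).count k ≤ (pvAllKeys chests keys).count k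

-- the key types obtainable starting from `keys`: a found key of a chest whose open key is
-- already obtainable is obtainable — both BFS loops compute exactly this closure
inductive pvReach (chests : List (List Int)) (keys : List Int) : Int → Prop
  | base (k : Int) : k ∈ keys → pvReach chests keys k
  | step (c : List Int) (f : Int) : c ∈ chests → pvReach chests keys (c.getD 1 0) →
      f ∈ c.drop 2 → pvReach chests keys f

theorem pvNodupLenLe {l L : List Int} (h : l.Nodup) (hs : l ⊆ L) : l.length ≤ L.length := by
  calc l.length = l.toFinset.card := (List.toFinset_card_of_nodup h).symm
    _ ≤ L.toFinset.card := Finset.card_le_card (fun x hx => by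
        simpa [List.mem_toFinset] using hs (by simpa [List.mem_toFinset] using hx))
    _ ≤ L.length := List.toFinset_card_le L

theorem pvNodupLenLe' {l L : List (List Int)} (h : l.Nodup) (hs : l ⊆ L) :
    l.length ≤ L.length := by
  calc l.length = l.toFinset.card := (List.toFinset_card_of_nodup h).symm
    _ ≤ L.toFinset.card := Finset.card_le_card (fun x hx => by
        simpa [List.mem_toFinset] using hs (by simpa [List.mem_toFinset] using hx))
    _ ≤ L.length := List.toFinset_card_le L

theorem pvGetD_erase_of_ne (d : PySem.Dict Int (List (List Int))) (k k' : Int) (h : k' ≠ k) :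
    (d.erase k).getD k' [] = d.getD k' [] := by
  obtain ⟨items⟩ := d
  simp only [PySem.Dict.erase, PySem.Dict.getD, PySem.Dict.get?]
  induction items with
  | nil => rfl
  | cons p t ih =>
    rw [List.filter_cons, List.find?_cons]
    by_cases hp : p.1 = k
    · have h1 : (!(p.1 == k)) = false := by simp [hp]
      have h2 : (p.1 == k') = false := by simp [hp, Ne.symm h]
      simp only [h1, h2, Bool.false_eq_true, if_false]
      exact ih
    · have h1 : (!(p.1 == k)) = true := by simp [hp]
      by_cases hp' : p.1 = k'
      · have h2 : (p.1 == k') = true := by simp [hp']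
        simp only [h1, if_true, List.find?_cons, h2]
      · have h2 : (p.1 == k') = false := by simp [hp']
        simp only [h1, if_true, List.find?_cons, h2]
        exact ih

-- A's accumulation loop, split into its two components.
theorem pvA_fold_eq (chests : List (List Int)) (keys : List Int) :
    chests.foldl (fun (s : List Int × List Int) chest =>
        (s.1 ++ chest.drop 2, s.2 ++ [chest.getD 1 0])) (keys, []) =
      (pvAllKeys chests keys, pvOpenKeys chests) := by
  suffices h : ∀ st : List Int × List Int,
      chests.foldl (fun (s : List Int × List Int) chest =>
        (s.1 ++ chest.drop 2, s.2 ++ [chest.getD 1 0])) st =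
      (st.1 ++ chests.flatMap (fun c => c.drop 2), st.2 ++ chests.map (fun c => c.getD 1 0)) by
    simpa [pvAllKeys, pvOpenKeys] using h (keys, [])
  induction chests with
  | nil => simp
  | cons c t ih => intro st; rw [List.foldl_cons, ih]; simp

-- B's interleaved Counter.update loop counts exactly the flattened found keys.
theorem pvB_total_getD (chests : List (List Int)) (d : PySem.Dict Int Int) (k : Int) :
    (chests.foldl (fun (d : PySem.Dict Int Int) c =>
        (c.drop 2).foldl (fun d k => d.modify k 0 (· + 1)) d) d).getD k 0 =
      d.getD k 0 + ((chests.flatMap (fun c => c.drop 2)).count k : Int) := by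
  induction chests generalizing d with
  | nil => simp
  | cons c t ih =>
    simp only [List.foldl_cons, ih, PySem.Dict.getD_foldl_modify_add_one, List.flatMap_cons,
      List.count_append]
    push_cast; ring

-- A's 'enough_keys_by_type' flag and B's deficit test are complementary.
theorem pvA_enough_iff (chests : List (List Int)) (keys : List Int) :
    ((PySem.Dict.counter (pvOpenKeys chests)).items.all
        (fun kv => decide (kv.2 ≤ (PySem.Dict.counter (pvAllKeys chests keys)).getD kv.1 0)) = true)
      ↔ pvEnough chests keys := by
  simp [PySem.Dict.items_counter, pvEnough, PySem.Dict.getD_counter, PySem.Set.mem_ofList]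

theorem pvB_gate_iff (chests : List (List Int)) (keys : List Int) :
    (((PySem.Dict.counter (chests.map (fun c => c.getD 1 0))).keys).any
        (fun k => decide ((chests.foldl (fun (d : PySem.Dict Int Int) c =>
            (c.drop 2).foldl (fun d k => d.modify k 0 (· + 1)) d)
            (PySem.Dict.counter keys)).getD k 0 <
          (PySem.Dict.counter (chests.map (fun c => c.getD 1 0))).getD k 0)) = true)
      ↔ ¬ pvEnough chests keys := by
  simp only [List.any_eq_true, PySem.Dict.keys_counter, PySem.Set.mem_ofList,
    PySem.Dict.getD_counter, pvB_total_getD, pvEnough, pvOpenKeys, pvAllKeys,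
    List.count_append, decide_eq_true_eq, not_forall]
  constructor
  · rintro ⟨k, hk, hlt⟩
    exact ⟨k, hk, by omega⟩
  · rintro ⟨k, hk, hle⟩
    exact ⟨k, hk, by omega⟩

-- B's initial loop builds the same deduplicated key list as seen set and as stack.
theorem pvInit_eq (keys : List Int) (s : PySem.Set Int) :
    keys.foldl (fun (st : PySem.Set Int × List Int) k =>
        if k ∈ st.1 then st else (PySem.Set.add st.1 k, st.2 ++ [k])) (s, s) =
      (PySem.Set.update s keys, PySem.Set.update s keys) := by
  induction keys generalizing s with
  | nil => simp [PySem.Set.update]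
  | cons k t ih =>
    rw [List.foldl_cons, PySem.Set.update_cons]
    by_cases hk : k ∈ s
    · rw [if_pos hk, PySem.Set.add_of_mem hk]; exact ih s
    · rw [if_neg hk, PySem.Set.add_of_not_mem hk]; exact ih (s ++ [k])

-- one inner push loop: it appends the same block `new` of fresh keys to seen and stack
theorem pvPush_fold1 (fl : List Int) (seen : PySem.Set Int) (stack : List Int)
    (hnd : seen.Nodup) :
    ∃ new : List Int,
      fl.foldl (fun (st : PySem.Set Int × List Int) f =>
          if f ∈ st.1 then st else (PySem.Set.add st.1 f, st.2 ++ [f])) (seen, stack) =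
        (seen ++ new, stack ++ new) ∧
      (∀ x ∈ new, x ∈ fl ∧ x ∉ seen) ∧
      (∀ x ∈ fl, x ∈ seen ++ new) ∧
      (seen ++ new).Nodup := by
  induction fl generalizing seen stack with
  | nil => exact ⟨[], by simp, by simp, by simp, by simpa using hnd⟩
  | cons f t ih =>
    by_cases hf : f ∈ seen
    · obtain ⟨new, h1, h2, h3, h4⟩ := ih seen stack hnd
      rw [List.foldl_cons, if_pos hf]
      refine ⟨new, h1, fun x hx => ⟨List.mem_cons_of_mem _ (h2 x hx).1, (h2 x hx).2⟩, ?_, h4⟩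
      intro x hx
      rcases List.mem_cons.mp hx with rfl | hx
      · exact List.mem_append_left _ hf
      · exact h3 x hx
    · have hnd' : (seen ++ [f]).Nodup := by
        refine List.nodup_append.mpr ⟨hnd, List.nodup_singleton f, ?_⟩
        intro a ha b hb
        simp only [List.mem_singleton] at hb
        subst hb
        exact fun h => hf (h ▸ ha)
      obtain ⟨new, h1, h2, h3, h4⟩ := ih (seen ++ [f]) (stack ++ [f]) hnd'
      rw [List.foldl_cons, if_neg hf, PySem.Set.add_of_not_mem hf]
      refine ⟨f :: new, ?_, ?_, ?_, ?_⟩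
      · simpa [List.append_assoc] using h1
      · intro x hx
        rcases List.mem_cons.mp hx with rfl | hx
        · exact ⟨List.mem_cons_self, hf⟩
        · refine ⟨List.mem_cons_of_mem _ (h2 x hx).1, fun hs => (h2 x hx).2 ?_⟩
          exact List.mem_append_left _ hs
      · intro x hx
        rcases List.mem_cons.mp hx with rfl | hx
        · simp
        · simpa [List.append_assoc] using h3 x hx
      · simpa [List.append_assoc] using h4

-- the whole bucket of found-key lists, pushed in one BFS step
theorem pvPush_fold (buckets : List (List Int)) (seen : PySem.Set Int) (stack : List Int)
    (hnd : seen.Nodup) :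
    ∃ new : List Int,
      buckets.foldl (fun (st : PySem.Set Int × List Int) fl =>
          fl.foldl (fun (st : PySem.Set Int × List Int) f =>
            if f ∈ st.1 then st else (PySem.Set.add st.1 f, st.2 ++ [f])) st) (seen, stack) =
        (seen ++ new, stack ++ new) ∧
      (∀ x ∈ new, x ∈ buckets.flatten ∧ x ∉ seen) ∧
      (∀ fl ∈ buckets, ∀ x ∈ fl, x ∈ seen ++ new) ∧
      (seen ++ new).Nodup := by
  induction buckets generalizing seen stack with
  | nil => exact ⟨[], by simp, by simp, by simp, by simpa using hnd⟩
  | cons fl t ih =>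
    obtain ⟨n1, h1, h2, h3, h4⟩ := pvPush_fold1 fl seen stack hnd
    obtain ⟨n2, g1, g2, g3, g4⟩ := ih (seen ++ n1) (stack ++ n1) h4
    rw [List.foldl_cons, h1]
    refine ⟨n1 ++ n2, by simpa [List.append_assoc] using g1, ?_, ?_, ?_⟩
    · intro x hx
      rcases List.mem_append.mp hx with hx | hx
      · obtain ⟨hxf, hxs⟩ := h2 x hx
        exact ⟨List.mem_flatten.mpr ⟨fl, by simp, hxf⟩, hxs⟩
      · obtain ⟨hxf, hxs⟩ := g2 x hx
        obtain ⟨l, hl, hxl⟩ := List.mem_flatten.mp hxf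
        exact ⟨List.mem_flatten.mpr ⟨l, List.mem_cons_of_mem _ hl, hxl⟩,
          fun hs => hxs (List.mem_append_left _ hs)⟩
    · intro l hl x hx
      rcases List.mem_cons.mp hl with rfl | hl
      · rcases List.mem_append.mp (h3 x hx) with h | h
        · exact List.mem_append_left _ h
        · exact List.mem_append_right _ (List.mem_append_left _ h)
      · simpa [List.append_assoc] using g3 l hl x hx
    · simpa [List.append_assoc] using g4

-- already-seen keys survive B's loop
theorem pvSeen_step_mono (l : List Int) (st : PySem.Set Int × List Int) (x : Int)
    (hx : x ∈ st.1) :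
    x ∈ (l.foldl (fun (st : PySem.Set Int × List Int) f =>
        if f ∈ st.1 then st else (PySem.Set.add st.1 f, st.2 ++ [f])) st).1 := by
  induction l generalizing st with
  | nil => exact hx
  | cons f t ih =>
    simp only [List.foldl_cons]
    split
    · exact ih st hx
    · exact ih _ (by simp [PySem.Set.mem_add, hx])

theorem pvSeen_fold_mono (ls : List (List Int)) (st : PySem.Set Int × List Int) (x : Int)
    (hx : x ∈ st.1) :
    x ∈ (ls.foldl (fun (st : PySem.Set Int × List Int) fl =>
        fl.foldl (fun (st : PySem.Set Int × List Int) f =>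
          if f ∈ st.1 then st else (PySem.Set.add st.1 f, st.2 ++ [f])) st) st).1 := by
  induction ls generalizing st with
  | nil => exact hx
  | cons fl t ih => exact ih _ (pvSeen_step_mono fl st x hx)

theorem pvBBfs_mono (fuel : Nat) (byOpen : PySem.Dict Int (List (List Int)))
    (seen : PySem.Set Int) (stack : List Int) (x : Int) (hx : x ∈ seen) :
    x ∈ pvBBfs fuel byOpen seen stack := by
  induction fuel generalizing byOpen seen stack with
  | zero => exact hx
  | succ n ih =>
    cases stack with
    | nil => exact hx
    | cons a b =>
      simp only [pvBBfs]
      exact ih _ _ _ (pvSeen_fold_mono _ _ x hx)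

-- B's loop invariant: the final seen set is sound for pvReach and closed under chest steps
theorem pvBBfs_spec (chests : List (List Int)) (keys : List Int) :
    ∀ (fuel : Nat) (byOpen : PySem.Dict Int (List (List Int)))
      (seen : PySem.Set Int) (stack : List Int),
    (∀ x ∈ stack, x ∈ seen) →
    (∀ k ∈ seen, pvReach chests keys k) →
    (∀ k ∈ seen, k ∈ stack ∨ ∀ c ∈ chests, c.getD 1 0 = k → ∀ f ∈ c.drop 2, f ∈ seen) →
    stack.Nodup →
    (∀ k : Int, (k ∈ stack ∨ k ∉ seen) → byOpen.getD k [] =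
        (chests.filter (fun c => c.getD 1 0 == k)).map (fun c => c.drop 2)) →
    seen.Nodup →
    (∀ x ∈ seen, x ∈ PySem.Set.ofList (keys ++ chests.flatMap (fun c => c.drop 2))) →
    (stack.length + (PySem.Set.ofList (keys ++ chests.flatMap (fun c => c.drop 2))).length
        ≤ fuel + seen.length) →
    (∀ x ∈ pvBBfs fuel byOpen seen stack, pvReach chests keys x) ∧
    (∀ k ∈ pvBBfs fuel byOpen seen stack, ∀ c ∈ chests, c.getD 1 0 = k →
        ∀ f ∈ c.drop 2, f ∈ pvBBfs fuel byOpen seen stack) := by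
  intro fuel
  induction fuel with
  | zero =>
    intro byOpen seen stack h1 h2 h3 h4 h5 h6 h7 hf
    have hle : seen.length ≤ (PySem.Set.ofList (keys ++ chests.flatMap (fun c => c.drop 2))).length :=
      pvNodupLenLe h6 h7
    have hstack : stack = [] := by
      cases stack with
      | nil => rfl
      | cons a b => simp at hf; omega
    subst hstack
    refine ⟨h2, fun k hk c hc hck f hfc => ?_⟩
    rcases h3 k hk with h | h
    · simp at h
    · exact h c hc hck f hfc
  | succ n ih =>
    intro byOpen seen stack h1 h2 h3 h4 h5 h6 h7 hf
    cases hst : stack with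
    | nil => subst hst; refine ⟨h2, fun k hk c hc hck f hfc => ?_⟩
             rcases h3 k hk with h | h
             · simp at h
             · exact h c hc hck f hfc
    | cons a b =>
      subst hst
      simp only [pvBBfs]
      set s : List Int := a :: b with hs
      have hsne : s ≠ [] := by simp [hs]
      have hsplit : s.dropLast ++ [s.getLastD 0] = s := by
        rcases List.eq_nil_or_concat s with h | ⟨L, x, h⟩
        · exact absurd h hsne
        · rw [h, List.concat_eq_append, List.dropLast_concat, List.getLastD_concat]
      set k := s.getLastD 0 with hk
      set stack0 := s.dropLast with hstack0
      have hkmem : k ∈ s := by rw [← hsplit]; exact List.mem_append_right _ (by simp)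
      have hknotin : k ∉ stack0 := by
        intro hkin
        have h4' := h4
        rw [← hsplit] at h4'
        rcases List.nodup_append.mp h4' with ⟨_, _, hdisj⟩
        exact (hdisj k hkin k (by simp)) rfl
      have hkseen : k ∈ seen := h1 k hkmem
      have hbucket : byOpen.getD k [] =
          (chests.filter (fun c => c.getD 1 0 == k)).map (fun c => c.drop 2) :=
        h5 k (Or.inl hkmem)
      rw [hbucket]
      obtain ⟨new, heq, hnew, hcover, hnd⟩ :=
        pvPush_fold ((chests.filter (fun c => c.getD 1 0 == k)).map (fun c => c.drop 2))
          seen stack0 h6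
      rw [heq]
      -- facts about the fresh keys
      have hnewSrc : ∀ x ∈ new, ∃ c ∈ chests, c.getD 1 0 = k ∧ x ∈ c.drop 2 := by
        intro x hx
        obtain ⟨hfl, _⟩ := hnew x hx
        rw [List.mem_flatten] at hfl
        obtain ⟨l, hl, hxl⟩ := hfl
        rw [List.mem_map] at hl
        obtain ⟨c, hc, rfl⟩ := hl
        rw [List.mem_filter] at hc
        exact ⟨c, hc.1, by simpa using hc.2, hxl⟩
      have h2' : ∀ x ∈ seen ++ new, pvReach chests keys x := by
        intro x hx
        rcases List.mem_append.mp hx with hx | hx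
        · exact h2 x hx
        · obtain ⟨c, hc, hck, hxc⟩ := hnewSrc x hx
          exact pvReach.step c x hc (hck ▸ h2 k hkseen) hxc
      refine ih (byOpen.erase k) (seen ++ new) (stack0 ++ new) ?_ h2' ?_ ?_ ?_ hnd ?_ ?_
      · -- stack ⊆ seen
        intro x hx
        rcases List.mem_append.mp hx with hx | hx
        · exact List.mem_append_left _ (h1 x (by rw [← hsplit]; exact List.mem_append_left _ hx))
        · exact List.mem_append_right _ hx
      · -- processed-or-on-stack
        intro x hx
        rcases List.mem_append.mp hx with hx | hx
        · rcases h3 x hx with hxs | hcl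
          · rw [← hsplit] at hxs
            rcases List.mem_append.mp hxs with hxs | hxs
            · exact Or.inl (List.mem_append_left _ hxs)
            · -- x = k: now processed via the coverage of its bucket
              simp only [List.mem_singleton] at hxs
              subst hxs
              refine Or.inr (fun c hc hck f hfc => ?_)
              refine hcover (c.drop 2) ?_ f hfc
              exact List.mem_map_of_mem (List.mem_filter.mpr ⟨hc, by simpa using hck⟩)
          · exact Or.inr (fun c hc hck f hfc => List.mem_append_left _ (hcl c hc hck f hfc))
        · exact Or.inl (List.mem_append_right _ hx)
      · -- stack Nodup
        rcases List.nodup_append.mp hnd with ⟨hseennd, hnewnd, hdisj⟩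
        refine List.nodup_append.mpr ⟨?_, hnewnd, ?_⟩
        · rw [← hsplit] at h4
          exact (List.nodup_append.mp h4).1
        · intro a ha b hb heq
          exact (hnew b hb).2
            (heq ▸ h1 a (by rw [← hsplit]; exact List.mem_append_left _ ha))
      · -- bucket description survives the erase
        intro k' hk'
        by_cases hkk : k' = k
        · subst hkk
          exfalso
          rcases hk' with hk' | hk'
          · rcases List.mem_append.mp hk' with h | h
            · exact hknotin h
            · exact (hnew _ h).2 hkseen
          · exact hk' (List.mem_append_left _ hkseen)
        · rw [pvGetD_erase_of_ne _ _ _ hkk]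
          refine h5 k' ?_
          rcases hk' with hk' | hk'
          · rcases List.mem_append.mp hk' with h | h
            · exact Or.inl (by rw [← hsplit]; exact List.mem_append_left _ h)
            · exact Or.inr (hnew _ h).2
          · exact Or.inr (fun h => hk' (List.mem_append_left _ h))
      · -- seen stays inside the key universe
        intro x hx
        rcases List.mem_append.mp hx with hx | hx
        · exact h7 x hx
        · obtain ⟨c, hc, _, hxc⟩ := hnewSrc x hx
          rw [PySem.Set.mem_ofList]
          exact List.mem_append_right _ (List.mem_flatMap.mpr ⟨c, hc, hxc⟩)
      · -- fuel bookkeeping: one pop, pushes paid by seen growth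
        have hlen : s.length = stack0.length + 1 := by
          rw [← hsplit]; simp
        simp only [List.length_append] at *
        omega

-- A's loop invariant: the loop returns true exactly when every open-key type is reachable
theorem pvABfs_spec (chests : List (List Int)) (keys : List Int) :
    ∀ (fuel : Nat) (seen : PySem.Set Int) (other queue : PySem.Set (List Int)),
    (∀ x ∈ seen, pvReach chests keys x) →
    (∀ x ∈ keys, x ∈ seen) →
    (∀ c ∈ queue, c ∈ chests ∧ c.getD 1 0 ∈ seen ∧ ¬ c.drop 2 = []) →
    (∀ c ∈ other, c ∈ chests) →
    (∀ c ∈ chests, c ∈ other ∨ c ∈ queue ∨ ∀ f ∈ c.drop 2, f ∈ seen) →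
    (∀ c ∈ other, c.getD 1 0 ∈ seen → ¬ c.drop 2 = [] → c ∈ queue) →
    queue.Nodup → other.Nodup →
    (¬ ∀ k ∈ pvOpenKeys chests, k ∈ seen) →
    ((PySem.Set.union other queue).length ≤ fuel) →
    (pvABfs fuel (PySem.Set.ofList (pvOpenKeys chests)) seen other queue = true
       ↔ ∀ k ∈ pvOpenKeys chests, pvReach chests keys k) := by
  intro fuel
  induction fuel with
  | zero =>
    intro seen other queue a1 a2 a3 a4 a5 a6 a7q a7o a8 afuel
    have hq : queue = [] := by
      cases hq : queue with
      | nil => rfl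
      | cons c r =>
        exfalso
        have : c ∈ PySem.Set.union other queue :=
          (PySem.Set.mem_union _ _ _).mpr (Or.inr (by simp [hq]))
        have := List.length_pos_of_mem this
        omega
    subst hq
    rw [pvABfs]
    refine iff_of_false (by simp) (fun hall => a8 (fun k hk => ?_))
    -- with an empty queue every reachable key is already seen
    have hclosed : ∀ x, pvReach chests keys x → x ∈ seen := by
      intro x hx
      induction hx with
      | base k hk => exact a2 k hk
      | step c f hc hr hf hseen =>
        rcases a5 c hc with hco | hcq | hdone
        · by_cases hemp : c.drop 2 = []
          · rw [hemp] at hf; simp at hf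
          · exact absurd (a6 c hco hseen hemp) (by simp)
        · simp at hcq
        · exact hdone f hf
    exact hclosed k (hall k hk)
  | succ n ih =>
    intro seen other queue a1 a2 a3 a4 a5 a6 a7q a7o a8 afuel
    cases hq : queue with
    | nil =>
      rw [pvABfs]
      refine iff_of_false (by simp) (fun hall => a8 (fun k hk => ?_))
      have hclosed : ∀ x, pvReach chests keys x → x ∈ seen := by
        intro x hx
        induction hx with
        | base k hk => exact a2 k hk
        | step c f hc hr hf hseen =>
          rcases a5 c hc with hco | hcq | hdone
          · by_cases hemp : c.drop 2 = []
            · rw [hemp] at hf; simp at hf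
            · exact absurd (a6 c hco hseen hemp) (by simp [hq])
          · simp [hq] at hcq
          · exact hdone f hf
      exact hclosed k (hall k hk)
    | cons x rest =>
      subst hq
      rw [pvABfs]
      have hxq : x ∈ (x :: rest : List (List Int)) := by simp
      obtain ⟨hxch, hxopen, hxne⟩ := a3 x hxq
      have hseen' : ∀ y ∈ PySem.Set.union seen (PySem.Set.ofList (x.drop 2)),
          pvReach chests keys y := by
        intro y hy
        rcases (PySem.Set.mem_union _ _ _).mp hy with hy | hy
        · exact a1 y hy
        · exact pvReach.step x y hxch (a1 _ hxopen) ((PySem.Set.mem_ofList _ _).mp hy)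
      by_cases hsub : PySem.Set.issubset (PySem.Set.ofList (pvOpenKeys chests))
          (PySem.Set.union seen (PySem.Set.ofList (x.drop 2))) = true
      · rw [if_pos hsub]
        refine iff_of_true rfl (fun k hk => ?_)
        have := (PySem.Set.issubset_iff _ _).mp hsub k ((PySem.Set.mem_ofList _ _).mpr hk)
        exact hseen' k this
      · rw [if_neg hsub]
        set seenN := PySem.Set.union seen (PySem.Set.ofList (x.drop 2)) with hseenN
        set otherN := PySem.Set.diff other (x :: rest) with hotherN
        set queueN := PySem.Set.union rest (otherN.filter (pvCanOpenNonEmpty seenN)) with hqueueN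
        have hmono : ∀ y ∈ seen, y ∈ seenN :=
          fun y hy => (PySem.Set.mem_union _ _ _).mpr (Or.inl hy)
        have hrest : ∀ c ∈ rest, c ∈ (x :: rest : List (List Int)) :=
          fun c hc => List.mem_cons_of_mem _ hc
        have hfiltmem : ∀ c ∈ otherN.filter (pvCanOpenNonEmpty seenN),
            c ∈ other ∧ c ∉ (x :: rest : List (List Int)) ∧
              c.getD 1 0 ∈ seenN ∧ ¬ c.drop 2 = [] := by
          intro c hc
          rw [List.mem_filter] at hc
          obtain ⟨hco, hcp⟩ := hc
          rw [hotherN] at hco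
          obtain ⟨hco, hcnq⟩ := (PySem.Set.mem_diff _ _ _).mp hco
          simp only [pvCanOpenNonEmpty, Bool.and_eq_true, Bool.not_eq_eq_eq_not,
            Bool.not_eq_true', List.isEmpty_eq_false_iff] at hcp
          obtain ⟨hne, hcon⟩ := hcp
          exact ⟨hco, hcnq, by
            have := PySem.Set.contains_iff seenN (c.getD 1 0)
            exact this.mp hcon, by simpa using hne⟩
        have hquN : ∀ c ∈ queueN, c ∈ chests ∧ c.getD 1 0 ∈ seenN ∧ ¬ c.drop 2 = [] := by
          intro c hc
          rcases (PySem.Set.mem_union _ _ _).mp hc with hc | hc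
          · obtain ⟨h1, h2, h3⟩ := a3 c (hrest c hc)
            exact ⟨h1, hmono _ h2, h3⟩
          · obtain ⟨hco, _, h2, h3⟩ := hfiltmem c hc
            exact ⟨a4 c hco, h2, h3⟩
        have hother' : ∀ c ∈ otherN, c ∈ chests := by
          intro c hc
          exact a4 c ((PySem.Set.mem_diff _ _ _).mp hc).1
        have ha5 : ∀ c ∈ chests, c ∈ otherN ∨ c ∈ queueN ∨ ∀ f ∈ c.drop 2, f ∈ seenN := by
          intro c hc
          have hsplitq : c ∈ (x :: rest : List (List Int)) →
              c ∈ queueN ∨ ∀ f ∈ c.drop 2, f ∈ seenN := by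
            intro hcq
            rcases List.mem_cons.mp hcq with rfl | hcr
            · exact Or.inr (fun f hf =>
                (PySem.Set.mem_union _ _ _).mpr (Or.inr ((PySem.Set.mem_ofList _ _).mpr hf)))
            · exact Or.inl ((PySem.Set.mem_union _ _ _).mpr (Or.inl hcr))
          rcases a5 c hc with hco | hcq | hdone
          · by_cases hcq : c ∈ (x :: rest : List (List Int))
            · rcases hsplitq hcq with h | h
              · exact Or.inr (Or.inl h)
              · exact Or.inr (Or.inr h)
            · exact Or.inl ((PySem.Set.mem_diff _ _ _).mpr ⟨hco, hcq⟩)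
          · rcases hsplitq hcq with h | h
            · exact Or.inr (Or.inl h)
            · exact Or.inr (Or.inr h)
          · exact Or.inr (Or.inr (fun f hf => hmono _ (hdone f hf)))
        have ha6 : ∀ c ∈ otherN, c.getD 1 0 ∈ seenN → ¬ c.drop 2 = [] → c ∈ queueN := by
          intro c hc hck hcne
          refine (PySem.Set.mem_union _ _ _).mpr (Or.inr ?_)
          rw [List.mem_filter]
          refine ⟨hc, ?_⟩
          simp only [pvCanOpenNonEmpty, Bool.and_eq_true, Bool.not_eq_eq_eq_not,
            Bool.not_eq_true', List.isEmpty_eq_false_iff]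
          exact ⟨by simpa using hcne, (PySem.Set.contains_iff _ _).mpr hck⟩
        have ha8 : ¬ ∀ k ∈ pvOpenKeys chests, k ∈ seenN := by
          intro hall
          apply hsub
          rw [PySem.Set.issubset_iff]
          intro y hy
          exact hall y ((PySem.Set.mem_ofList _ _).mp hy)
        have hqN_nd : queueN.Nodup :=
          PySem.Set.nodup_union _ _ ((List.nodup_cons.mp a7q).2)
        have hoN_nd : otherN.Nodup := PySem.Set.nodup_diff _ _ a7o
        have hfuel : (PySem.Set.union otherN queueN).length ≤ n := by
          have hndU : (PySem.Set.union otherN queueN).Nodup :=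
            PySem.Set.nodup_union _ _ hoN_nd
          have hsubU : ∀ y ∈ PySem.Set.union otherN queueN,
              y ∈ (PySem.Set.union other (x :: rest)).erase x := by
            intro y hy
            have hyne : y ≠ x := by
              intro h
              subst h
              rcases (PySem.Set.mem_union _ _ _).mp hy with h | h
              · exact ((PySem.Set.mem_diff _ _ _).mp h).2 hxq
              · rcases (PySem.Set.mem_union _ _ _).mp h with h | h
                · exact (List.nodup_cons.mp a7q).1 h
                · exact (hfiltmem y h).2.1 hxq
            have hymem : y ∈ PySem.Set.union other (x :: rest) := by
              rcases (PySem.Set.mem_union _ _ _).mp hy with h | h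
              · exact (PySem.Set.mem_union _ _ _).mpr
                  (Or.inl ((PySem.Set.mem_diff _ _ _).mp h).1)
              · rcases (PySem.Set.mem_union _ _ _).mp h with h | h
                · exact (PySem.Set.mem_union _ _ _).mpr (Or.inr (hrest y h))
                · exact (PySem.Set.mem_union _ _ _).mpr (Or.inl (hfiltmem y h).1)
            exact (List.mem_erase_of_ne hyne).mpr hymem
          have hxU : x ∈ PySem.Set.union other (x :: rest) :=
            (PySem.Set.mem_union _ _ _).mpr (Or.inr hxq)
          have := pvNodupLenLe' hndU hsubU
          rw [List.length_erase_of_mem hxU] at this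
          have hpos := List.length_pos_of_mem hxU
          omega
        exact ih seenN otherN queueN hseen' (fun y hy => hmono _ (a2 y hy))
          hquN hother' ha5 ha6 hqN_nd hoN_nd ha8 hfuel

-- the B-side entry state and final result, phrased through pvReach
theorem pvB_result_iff (chests : List (List Int)) (keys : List Int) :
    (∀ x ∈ pvBBfs (keys.length + (chests.map (fun c => (c.drop 2).length)).sum)
        (chests.foldl (fun (d : PySem.Dict Int (List (List Int))) c =>
          d.modify (c.getD 1 0) [] (· ++ [c.drop 2])) PySem.Dict.empty)
        (PySem.Set.ofList keys) (PySem.Set.ofList keys), pvReach chests keys x) ∧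
    (∀ x : Int, pvReach chests keys x →
      x ∈ pvBBfs (keys.length + (chests.map (fun c => (c.drop 2).length)).sum)
        (chests.foldl (fun (d : PySem.Dict Int (List (List Int))) c =>
          d.modify (c.getD 1 0) [] (· ++ [c.drop 2])) PySem.Dict.empty)
        (PySem.Set.ofList keys) (PySem.Set.ofList keys)) := by
  have hbyo : ∀ k : Int, (chests.foldl (fun (d : PySem.Dict Int (List (List Int))) c =>
      d.modify (c.getD 1 0) [] (· ++ [c.drop 2])) PySem.Dict.empty).getD k [] =
      (chests.filter (fun c => c.getD 1 0 == k)).map (fun c => c.drop 2) := by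
    intro k
    have := PySem.Dict.getD_foldl_modify_append
      (chests.map (fun c => (c.getD 1 0, c.drop 2))) (PySem.Dict.empty) k
    rw [List.foldl_map] at this
    simpa [List.filter_map, List.map_map, Function.comp_def] using this
  have hspec := pvBBfs_spec chests keys
      (keys.length + (chests.map (fun c => (c.drop 2).length)).sum)
      (chests.foldl (fun (d : PySem.Dict Int (List (List Int))) c =>
        d.modify (c.getD 1 0) [] (· ++ [c.drop 2])) PySem.Dict.empty)
      (PySem.Set.ofList keys) (PySem.Set.ofList keys)
      (fun x hx => hx) (fun k hk => pvReach.base k ((PySem.Set.mem_ofList _ _).mp hk))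
      (fun k hk => Or.inl hk) (PySem.Set.nodup_ofList _) (fun k _ => hbyo k)
      (PySem.Set.nodup_ofList _)
      (fun x hx => (PySem.Set.mem_ofList _ _).mpr
        (List.mem_append_left _ ((PySem.Set.mem_ofList _ _).mp hx)))
      (by
        have h1 : (PySem.Set.ofList keys).length ≤ keys.length :=
          PySem.Set.length_ofList_le _
        have h2 : (PySem.Set.ofList (keys ++ chests.flatMap (fun c => c.drop 2))).length ≤
            keys.length + (chests.map (fun c => (c.drop 2).length)).sum := by
          have := PySem.Set.length_ofList_le (keys ++ chests.flatMap (fun c => c.drop 2))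
          simpa [List.length_append, List.length_flatMap, Function.comp_def] using this
        omega)
  refine ⟨hspec.1, fun x hx => ?_⟩
  induction hx with
  | base k hk =>
    exact pvBBfs_mono _ _ _ _ _ ((PySem.Set.mem_ofList _ _).mpr hk)
  | step c f hc hr hf hin =>
    exact hspec.2 _ hin c hc rfl f hf

-- ===== VERDICT (by name: the statement is the Claim_ definition above) =====
theorem can_open_all_py_spec : Claim_equal_can_open_all_py := by
  intro chests keys _ hpre
  unfold Spec_can_open_all_py can_open_all_py can_open_all_py_alt
  by_cases hnil : chests = []
  · subst hnil; simp
  · simp only [if_neg hnil, pvA_fold_eq]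
    by_cases hE : pvEnough chests keys
    · have hA_en := (pvA_enough_iff chests keys).mpr hE
      have hB := Bool.eq_false_iff.mpr (fun h => ((pvB_gate_iff chests keys).mp h) hE)
      rw [hA_en, hB]
      simp only [Bool.not_true, Bool.false_eq_true, if_false]
      -- both sides are now 'is every open-key type reachable from keys?'
      have hBres := pvB_result_iff chests keys
      rw [pvInit_eq keys [], PySem.Set.update_nil_left]
      simp only [Prod.fst, Prod.snd]
      have hBiff : ((PySem.Dict.counter (chests.map (fun c => c.getD 1 0))).keys.all
          (fun k => decide (k ∈ pvBBfs (keys.length + (chests.map (fun c => (c.drop 2).length)).sum)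
            (chests.foldl (fun (d : PySem.Dict Int (List (List Int))) c =>
              d.modify (c.getD 1 0) [] (· ++ [c.drop 2])) PySem.Dict.empty)
            (PySem.Set.ofList keys) (PySem.Set.ofList keys))) = true)
          ↔ ∀ k ∈ pvOpenKeys chests, pvReach chests keys k := by
        rw [PySem.Dict.keys_counter]
        simp only [List.all_eq_true, decide_eq_true_eq]
        constructor
        · intro hall k hk
          exact hBres.1 k (hall k ((PySem.Set.mem_ofList _ _).mpr (by simpa [pvOpenKeys] using hk)))
        · intro hall k hk
          exact hBres.2 k (hall k (by simpa [pvOpenKeys] using (PySem.Set.mem_ofList _ _).mp hk))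
      by_cases hsub : PySem.Set.issubset (PySem.Set.ofList (pvOpenKeys chests))
          (PySem.Set.ofList keys) = true
      · rw [if_pos hsub]
        symm
        rw [hBiff]
        intro k hk
        exact pvReach.base k ((PySem.Set.mem_ofList _ _).mp
          ((PySem.Set.issubset_iff _ _).mp hsub k ((PySem.Set.mem_ofList _ _).mpr hk)))
      · rw [if_neg hsub]
        have ha8 : ¬ ∀ k ∈ pvOpenKeys chests, k ∈ PySem.Set.ofList keys := by
          intro hall
          apply hsub
          rw [PySem.Set.issubset_iff]
          intro y hy
          exact hall y ((PySem.Set.mem_ofList _ _).mp hy)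
        have hAiff := pvABfs_spec chests keys chests.length (PySem.Set.ofList keys)
          (PySem.Set.ofList chests)
          (PySem.Set.ofList (chests.filter (pvCanOpenNonEmpty (PySem.Set.ofList keys))))
          (fun x hx => pvReach.base x ((PySem.Set.mem_ofList _ _).mp hx))
          (fun x hx => (PySem.Set.mem_ofList _ _).mpr hx)
          (by
            intro c hc
            have hc' := (PySem.Set.mem_ofList _ _).mp hc
            rw [List.mem_filter] at hc'
            obtain ⟨hcch, hcp⟩ := hc'
            simp only [pvCanOpenNonEmpty, Bool.and_eq_true, Bool.not_eq_eq_eq_not,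
              Bool.not_eq_true', List.isEmpty_eq_false_iff] at hcp
            exact ⟨hcch, (PySem.Set.contains_iff _ _).mp hcp.2, by simpa using hcp.1⟩)
          (fun c hc => (PySem.Set.mem_ofList _ _).mp hc)
          (fun c hc => Or.inl ((PySem.Set.mem_ofList _ _).mpr hc))
          (by
            intro c hc hck hcne
            refine (PySem.Set.mem_ofList _ _).mpr ?_
            rw [List.mem_filter]
            refine ⟨(PySem.Set.mem_ofList _ _).mp hc, ?_⟩
            simp only [pvCanOpenNonEmpty, Bool.and_eq_true, Bool.not_eq_eq_eq_not,
              Bool.not_eq_true', List.isEmpty_eq_false_iff]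
            exact ⟨by simpa using hcne, (PySem.Set.contains_iff _ _).mpr hck⟩)
          (PySem.Set.nodup_ofList _) (PySem.Set.nodup_ofList _) ha8
          (by
            have hnd : (PySem.Set.union (PySem.Set.ofList chests)
                (PySem.Set.ofList (chests.filter (pvCanOpenNonEmpty (PySem.Set.ofList keys))))).Nodup :=
              PySem.Set.nodup_union _ _ (PySem.Set.nodup_ofList _)
            have hsubc : ∀ y ∈ PySem.Set.union (PySem.Set.ofList chests)
                (PySem.Set.ofList (chests.filter (pvCanOpenNonEmpty (PySem.Set.ofList keys)))),
                y ∈ chests := by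
              intro y hy
              rcases (PySem.Set.mem_union _ _ _).mp hy with h | h
              · exact (PySem.Set.mem_ofList _ _).mp h
              · exact (List.mem_filter.mp ((PySem.Set.mem_ofList _ _).mp h)).1
            exact pvNodupLenLe' hnd hsubc)
        rw [Bool.eq_iff_iff, hAiff, hBiff]
    · -- not enough keys: both return False at the count gate
      have hA_en := Bool.eq_false_iff.mpr (fun h => hE ((pvA_enough_iff chests keys).mp h))
      have hB := (pvB_gate_iff chests keys).mpr hE
      rw [hA_en, hB]
      simp
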